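-- pv_equiv track=rewrite | github.com/Oryan-Hassidim/Ex | Ex8/puzzle_solver_B.py | min_seen_cells
-- ===== SOURCE A (Python) =====
-- from typing import List, Tuple, Set, Optional
--
-- Picture = List[List[int]]
--
-- W = 1  # white
--
-- def min_seen_cells(picture: Picture, row: int, col: int) -> int:
--     if picture[row][col] != W:
--         return 0
--     count = 1
--     i, j = row - 1, col - 1
--     while i >= 0 and picture[i][col] == W:
--         count, i = count + 1, i - 1
--     while j >= 0 and picture[row][j] == W:
--         count, j = count + 1, j - 1
--     i, j = row + 1, col + 1
--     while i < len(picture) and picture[i][col] == W: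
--         count, i = count + 1, i + 1
--     while j < len(picture[0]) and picture[row][j] == W:
--         count, j = count + 1, j + 1
--     return count
-- ===== SOURCE B (Python) =====
-- W = 1  # white
--
--
-- def _run_length(seq, idx):
--     # length of the maximal contiguous run of white cells containing idx:
--     # one forward pass recording the nearest blockers below and above idx.
--     lo, hi = -1, len(seq)
--     for k, x in enumerate(seq):
--         if x != W:
--             if k < idx:
--                 lo = max(lo, k)
--             elif k > idx:
--                 hi = min(hi, k)
--     return hi - lo - 1
--
--
-- def min_seen_cells(picture, row, col):
--     if picture[row][col] != W:
--         return 0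
--     column = [r[col] for r in picture]
--     return _run_length(picture[row], col) + _run_length(column, row) - 1
-- ===== Notes on version B (the rewrite author's own statement) =====
-- stated objective: alternative
-- what changed: A counts white cells with four directional while-loops radiating from the center; B makes one forward pass over the row and one over the column, recording the nearest blocking cells below and above the center, and returns the runs by the closed form (hi-lo-1) per axis combined as row_run+col_run-1.
-- outside the precondition, e.g. on min_seen_cells([[1]], -1, 0): A returns 2, B returns 1; on min_seen_cells([[1, 1], [1]], 1, 0): A raises IndexError, B returns 2
import Mathlib
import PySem

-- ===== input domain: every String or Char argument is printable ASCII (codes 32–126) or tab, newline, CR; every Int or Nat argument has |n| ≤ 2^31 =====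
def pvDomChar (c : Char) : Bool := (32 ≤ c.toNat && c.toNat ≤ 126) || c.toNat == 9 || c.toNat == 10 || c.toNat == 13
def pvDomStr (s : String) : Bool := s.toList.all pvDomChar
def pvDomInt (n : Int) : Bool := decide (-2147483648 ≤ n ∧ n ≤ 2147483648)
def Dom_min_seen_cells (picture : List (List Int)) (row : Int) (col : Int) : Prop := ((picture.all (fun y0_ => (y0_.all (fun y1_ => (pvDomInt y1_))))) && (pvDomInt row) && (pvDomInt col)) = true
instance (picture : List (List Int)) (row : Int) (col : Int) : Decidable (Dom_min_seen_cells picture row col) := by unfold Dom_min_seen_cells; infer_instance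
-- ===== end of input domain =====

-- B replaces A's four directional while-loops by one forward pass per axis that records the
-- nearest blocking cells around the center and combines the two run lengths by a closed form.


-- ===== PORT A =====
-- picture[i][j] (Python indexing, negative wraps; none = IndexError)
def pvCell (picture : List (List Int)) (i j : Int) : Option Int :=
  match PySem.List.pyGet? picture i with
  | none => none
  | some r => PySem.List.pyGet? r j

-- while i >= 0 and picture[i][col] == W: count, i = count + 1, i - 1   (fuel bounds the iterations)
def pvUpA (picture : List (List Int)) (col : Int) : Nat → Int → Int
  | 0, _ => 0
  | fuel+1, i => if 0 ≤ i ∧ pvCell picture i col = some 1 then 1 + pvUpA picture col fuel (i-1) else 0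

-- while j >= 0 and picture[row][j] == W
def pvLeftA (picture : List (List Int)) (row : Int) : Nat → Int → Int
  | 0, _ => 0
  | fuel+1, j => if 0 ≤ j ∧ pvCell picture row j = some 1 then 1 + pvLeftA picture row fuel (j-1) else 0

-- while i < len(picture) and picture[i][col] == W
def pvDownA (picture : List (List Int)) (col : Int) (n : Int) : Nat → Int → Int
  | 0, _ => 0
  | fuel+1, i => if i < n ∧ pvCell picture i col = some 1 then 1 + pvDownA picture col n fuel (i+1) else 0

-- while j < len(picture[0]) and picture[row][j] == W
def pvRightA (picture : List (List Int)) (row : Int) (w : Int) : Nat → Int → Int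
  | 0, _ => 0
  | fuel+1, j => if j < w ∧ pvCell picture row j = some 1 then 1 + pvRightA picture row w fuel (j+1) else 0

def min_seen_cells (picture : List (List Int)) (row : Int) (col : Int) : Int :=
  if pvCell picture row col ≠ some 1 then 0
  else
    1 + pvUpA picture col (picture.length + 1) (row - 1)
      + pvLeftA picture row (((PySem.List.pyGet? picture row).getD []).length + 1) (col - 1)
      + pvDownA picture col (picture.length : Int) (2 * picture.length + 2) (row + 1)
      + pvRightA picture row (((PySem.List.pyGet? picture 0).getD []).length : Int)
          (((PySem.List.pyGet? picture 0).getD []).length + ((PySem.List.pyGet? picture row).getD []).length + 2) (col + 1)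

-- ===== PORT B =====
-- column = [r[col] for r in picture]
def pvColumn (picture : List (List Int)) (col : Int) : List Int :=
  picture.map (fun r => (PySem.List.pyGet? r col).getD 0)

-- loop body of B's single forward pass: nearest blocker below idx (lo) and above idx (hi)
def pvStep (idx : Int) : (Int × Int) → (Int × Int) → (Int × Int) := fun st kx =>
  if kx.2 ≠ 1 then
    if kx.1 < idx then (max st.1 kx.1, st.2)
    else if idx < kx.1 then (st.1, min st.2 kx.1)
    else st
  else st

-- _run_length(seq, idx) = hi - lo - 1
def pvRunB (seq : List Int) (idx : Int) : Int :=
  let p := (PySem.List.enumerate seq 0).foldl (pvStep idx) (-1, (seq.length : Int))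
  p.2 - p.1 - 1

def min_seen_cells_alt (picture : List (List Int)) (row : Int) (col : Int) : Int :=
  if pvCell picture row col ≠ some 1 then 0
  else pvRunB ((PySem.List.pyGet? picture row).getD []) col
     + pvRunB (pvColumn picture col) row - 1

-- ===== PRECONDITION & SPEC =====
-- Pre_ excludes inputs where the center access picture[row][col] raises IndexError, and — only when
-- the center is white, so that A's four scans actually run — negative (Python wraparound) center
-- indices and ragged pictures, on which A may raise IndexError or count cells found by accidental
-- negative-index wraparound.
def Pre_min_seen_cells (picture : List (List Int)) (row : Int) (col : Int) : Prop :=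
  pvCell picture row col ≠ none ∧
  (pvCell picture row col = some 1 →
    0 ≤ row ∧ 0 ≤ col ∧ ∀ r ∈ picture, r.length = (picture.headD []).length)
instance (picture : List (List Int)) (row : Int) (col : Int) : Decidable (Pre_min_seen_cells picture row col) := by unfold Pre_min_seen_cells; infer_instance

def pvWitness_min_seen_cells : List (List Int) × Int × Int := ([[0, 1, 1], [1, 1, 0]], 0, 1)

def Spec_min_seen_cells (picture : List (List Int)) (row : Int) (col : Int) (out : Int) : Prop := out = min_seen_cells_alt picture row col
instance (picture : List (List Int)) (row : Int) (col : Int) (out : Int) : Decidable (Spec_min_seen_cells picture row col out) := by unfold Spec_min_seen_cells; infer_instance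

-- ===== CLAIM (what is proved, stated in full; the proofs are below) =====
def Claim_equal_min_seen_cells : Prop := ∀ (picture : List (List Int)) (row : Int) (col : Int), Dom_min_seen_cells picture row col → Pre_min_seen_cells picture row col → Spec_min_seen_cells picture row col (min_seen_cells picture row col)

-- ===== LEMMAS AND PROOFS =====

-- generic leftward scan over one sequence (proof-side mirror of A's up/left loops)
def scanL (seq : List Int) : Nat → Int → Int
  | 0, _ => 0
  | f+1, j => if 0 ≤ j ∧ PySem.List.pyGet? seq j = some 1 then 1 + scanL seq f (j-1) else 0

-- generic rightward scan (mirror of A's down/right loops)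
def scanR (seq : List Int) (n : Int) : Nat → Int → Int
  | 0, _ => 0
  | f+1, j => if j < n ∧ PySem.List.pyGet? seq j = some 1 then 1 + scanR seq n f (j+1) else 0

-- index of the last blocked (≠ 1) element of l, enumerated from s
def LB : List Int → Int → Option Int
  | [], _ => none
  | x :: r, s => match LB r (s+1) with
    | some k => some k
    | none => if x ≠ 1 then some s else none

-- index of the first blocked element of l, enumerated from s
def FB : List Int → Int → Option Int
  | [], _ => none
  | x :: r, s => if x ≠ 1 then some s else FB r (s+1)

def loStep (idx : Int) : Int → (Int × Int) → Int := fun a kx => if kx.2 ≠ 1 ∧ kx.1 < idx then max a kx.1 else a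
def hiStep (idx : Int) : Int → (Int × Int) → Int := fun b kx => if kx.2 ≠ 1 ∧ idx < kx.1 then min b kx.1 else b
def loMax : Int → (Int × Int) → Int := fun a kx => if kx.2 ≠ 1 then max a kx.1 else a
def hiMin : Int → (Int × Int) → Int := fun b kx => if kx.2 ≠ 1 then min b kx.1 else b

theorem pvStep_split (idx : Int) (l : List (Int × Int)) : ∀ st : Int × Int,
    l.foldl (pvStep idx) st = (l.foldl (loStep idx) st.1, l.foldl (hiStep idx) st.2) := by
  induction l with
  | nil => intro st; rfl
  | cons x r ih =>
    intro st
    simp only [List.foldl_cons]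
    rw [ih]
    congr 1 <;> · simp only [pvStep, loStep, hiStep]; split_ifs <;> simp_all <;> omega

theorem LB_bound : ∀ (l : List Int) (s k : Int), LB l s = some k → s ≤ k ∧ k < s + l.length := by
  intro l
  induction l with
  | nil => intro s k h; simp [LB] at h
  | cons x r ih =>
    intro s k h
    cases hr : LB r (s+1) with
    | none =>
      simp only [LB, hr] at h
      by_cases hx : x ≠ 1
      · rw [if_pos hx] at h
        cases h
        simp only [List.length_cons]; push_cast; omega
      · rw [if_neg hx] at h; cases h
    | some k' =>
      simp only [LB, hr] at h
      cases h
      have := ih (s+1) _ hr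
      simp only [List.length_cons]; push_cast; omega

theorem FB_bound : ∀ (l : List Int) (s k : Int), FB l s = some k → s ≤ k ∧ k < s + l.length := by
  intro l
  induction l with
  | nil => intro s k h; simp [FB] at h
  | cons x r ih =>
    intro s k h
    simp only [FB] at h
    split_ifs at h with hx
    · cases h; simp only [List.length_cons]; push_cast; omega
    · have := ih (s+1) k h
      simp only [List.length_cons]; push_cast; omega

theorem fold_loMax : ∀ (l : List Int) (s b : Int),
    (PySem.List.enumerate l s).foldl loMax b =
      (match LB l s with | none => b | some k => max b k) := by
  intro l
  induction l with
  | nil => intro s b; simp [PySem.List.enumerate_nil, LB]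
  | cons x r ih =>
    intro s b
    rw [PySem.List.enumerate_cons]
    simp only [List.foldl_cons]
    rw [ih]
    rcases hr : LB r (s+1) with _ | k'
    · simp only [LB, hr, loMax]
      split_ifs <;> simp_all
    · have hb := LB_bound r (s+1) k' hr
      simp only [LB, hr, loMax]
      split_ifs with hx
      · show max (max b s) k' = max b k'
        rw [max_assoc, max_eq_right (by omega : s ≤ k')]
      · rfl

theorem fold_hiMin : ∀ (l : List Int) (s b : Int),
    (PySem.List.enumerate l s).foldl hiMin b =
      (match FB l s with | none => b | some k => min b k) := by
  intro l
  induction l with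
  | nil => intro s b; simp [PySem.List.enumerate_nil, FB]
  | cons x r ih =>
    intro s b
    rw [PySem.List.enumerate_cons]
    simp only [List.foldl_cons]
    rw [ih]
    simp only [FB, hiMin]
    split_ifs with hx
    · rcases hr : FB r (s+1) with _ | k'
      · rfl
      · have hb := FB_bound r (s+1) k' hr
        show min (min b s) k' = min b s
        rw [min_assoc, min_eq_left (by omega : s ≤ k')]
    · rfl

theorem foldl_keep {α β : Type} (l : List β) (a : α) : l.foldl (fun a _ => a) a = a := by
  induction l generalizing a <;> simp_all

theorem LB_append (y : Int) : ∀ (l : List Int) (s : Int),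
    LB (l ++ [y]) s = if y ≠ 1 then some (s + l.length) else LB l s := by
  intro l
  induction l with
  | nil => intro s; simp [LB]
  | cons x r ih =>
    intro s
    simp only [List.cons_append, LB, ih (s+1)]
    by_cases hy : y ≠ 1
    · simp only [if_pos hy]
      show some (s + 1 + (r.length : Int)) = some (s + ((x :: r).length : Int))
      simp only [List.length_cons]
      push_cast
      congr 1
      omega
    · simp only [if_neg hy]

theorem pyGet?_map_cell (f : List Int → Int) (l : List (List Int)) (i : Int) :
    PySem.List.pyGet? (l.map f) i = (PySem.List.pyGet? l i).map f := by
  simp [PySem.List.pyGet?]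

theorem scanL_eq (seq : List Int) : ∀ (t : Nat) (fuel : Nat), t ≤ seq.length → t ≤ fuel →
    scanL seq fuel ((t:Int) - 1) =
      (t:Int) - 1 - (match LB (seq.take t) 0 with | none => -1 | some k => k) := by
  intro t
  induction t with
  | zero =>
    intro fuel _ _
    cases fuel with
    | zero => simp [scanL, LB]
    | succ f => simp [scanL, LB]
  | succ t ih =>
    intro fuel ht hf
    cases fuel with
    | zero => omega
    | succ f =>
      have htlt : t < seq.length := by omega
      have hget : PySem.List.pyGet? seq ((t:Int)+1-1) = some seq[t] := by
        have : (t:Int) + 1 - 1 = (t:Int) := by omega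
        rw [this, PySem.List.pyGet?_natCast, List.getElem?_eq_getElem htlt]
      have htake : seq.take (t+1) = seq.take t ++ [seq[t]] := by
        rw [List.take_succ, List.getElem?_eq_getElem htlt]; rfl
      rw [htake, LB_append]
      push_cast
      by_cases hx : seq[t] = 1
      · rw [if_neg (by simpa using hx)]
        simp only [scanL]
        rw [if_pos ⟨by omega, by rw [hget, hx]⟩]
        have : (t:Int) + 1 - 1 - 1 = (t:Int) - 1 := by omega
        rw [this, ih f (by omega) (by omega)]
        have hlen : (seq.take t).length = t := by simp [List.length_take]; omega
        rcases h : LB (seq.take t) 0 with _ | k <;> simp only [h, hlen] <;> push_cast <;> omega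
      · rw [if_pos (by simpa using hx)]
        simp only [scanL]
        rw [if_neg (by rw [hget]; simp [hx])]
        have hlen : (seq.take t).length = t := by simp [List.length_take]; omega
        simp only [hlen]
        show (0:Int) = (t:Int) + 1 - 1 - (0 + (t:Int))
        omega

theorem scanR_eq (seq : List Int) : ∀ (l : List Int) (s : Int) (fuel : Nat),
    0 ≤ s → s ≤ (seq.length : Int) → seq.drop s.toNat = l → l.length + 1 ≤ fuel →
    scanR seq (seq.length : Int) fuel s =
      (match FB l s with | none => (seq.length : Int) | some k => k) - s := by
  intro l
  induction l with
  | nil =>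
    intro s fuel h0 hle hdrop hf
    have hs : s = (seq.length : Int) := by
      have := List.drop_eq_nil_iff.mp hdrop
      omega
    cases fuel with
    | zero => omega
    | succ f =>
      simp only [scanR]
      rw [if_neg (by omega)]
      have hm : (match FB ([] : List Int) s with | none => ((seq.length : Int)) | some k => k) = (seq.length : Int) := rfl
      rw [hm]
      omega
  | cons x r ih =>
    intro s fuel h0 hle hdrop hf
    have hlt : s.toNat < seq.length := by
      by_contra hc
      rw [List.drop_eq_nil_iff.mpr (by omega)] at hdrop
      cases hdrop
    have hcons := List.drop_eq_getElem_cons hlt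
    rw [hdrop] at hcons
    cases hcons
    have hget : PySem.List.pyGet? seq s = some seq[s.toNat] := by
      conv_lhs => rw [show s = ((s.toNat : Nat) : Int) by omega]
      rw [PySem.List.pyGet?_natCast, List.getElem?_eq_getElem hlt]
    cases fuel with
    | zero => simp at hf
    | succ f =>
      by_cases hx : seq[s.toNat] = 1
      · simp only [scanR, FB]
        rw [if_pos ⟨by omega, by rw [hget, hx]⟩, if_neg (by simpa using hx)]
        have hdrop' : seq.drop (s+1).toNat = seq.drop (s.toNat+1) := by
          have h2 : (s+1).toNat = s.toNat + 1 := by omega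
          rw [h2]
        rw [ih (s+1) f (by omega) (by omega) hdrop' (by simp at hf ⊢; omega)]
        rcases h : FB (seq.drop (s.toNat+1)) (s+1) with _ | k <;> simp only [h] <;> omega
      · simp only [scanR, FB]
        rw [if_neg (by rw [hget]; simp [hx]), if_pos (by simpa using hx)]
        show (0:Int) = s - s
        omega

theorem pvRunB_eq (seq : List Int) (t : Nat) (ht : t < seq.length) :
    pvRunB seq (t:Int) =
      (match FB (seq.drop (t+1)) ((t:Int)+1) with | none => (seq.length : Int) | some k => k)
      - (match LB (seq.take t) 0 with | none => -1 | some k => k) - 1 := by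
  simp only [pvRunB]
  rw [pvStep_split]
  -- lo component
  have hsplit1 := PySem.List.enumerate_append (xs := seq.take t) (ys := seq.drop t) (s := (0:Int))
  rw [List.take_append_drop] at hsplit1
  have hlen1 : (seq.take t).length = t := by simp [List.length_take]; omega
  have hlo : (PySem.List.enumerate seq 0).foldl (loStep (t:Int)) (-1) =
      (match LB (seq.take t) 0 with | none => (-1:Int) | some k => k) := by
    rw [hsplit1, List.foldl_append]
    have h1 : (PySem.List.enumerate (seq.take t) 0).foldl (loStep (t:Int)) (-1) =
        (PySem.List.enumerate (seq.take t) 0).foldl loMax (-1) := by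
      apply PySem.List.foldl_congr_mem
      intro acc x hx
      rcases (PySem.List.mem_enumerate_iff _ _ _).mp hx with ⟨k, hk, rfl⟩
      have hklt : (0:Int) + (k:Int) < (t:Int) := by rw [hlen1] at hk; push_cast; omega
      simp only [loStep, loMax, and_iff_left hklt]
    rw [h1, fold_loMax]
    have h2 : ∀ (acc : Int) (x : Int × Int), x ∈ PySem.List.enumerate (seq.drop t) (0 + ((seq.take t).length : Int)) → loStep (t:Int) acc x = acc := by
      intro acc x hx
      rcases (PySem.List.mem_enumerate_iff _ _ _).mp hx with ⟨k, hk, rfl⟩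
      have hnlt : ¬ ((0 + ((seq.take t).length : Int) + (k:Int)) < (t:Int)) := by rw [hlen1]; push_cast; omega
      simp only [loStep]
      exact if_neg (fun h => hnlt h.2)
    calc ((PySem.List.enumerate (seq.drop t) (0 + ((seq.take t).length : Int))).foldl (loStep (t:Int))
            (match LB (seq.take t) 0 with | none => (-1:Int) | some k => max (-1) k))
        = (match LB (seq.take t) 0 with | none => (-1:Int) | some k => max (-1) k) := by
          rw [PySem.List.foldl_congr_mem _ _ (fun a _ => a) _ h2, foldl_keep]
      _ = (match LB (seq.take t) 0 with | none => (-1:Int) | some k => k) := by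
          rcases h : LB (seq.take t) 0 with _ | k
          · rfl
          · have := LB_bound _ _ _ h
            simp only []
            rw [max_eq_right (by omega : (-1:Int) ≤ k)]
  -- hi component
  have hle1 : t + 1 ≤ seq.length := by omega
  have hsplit2 := PySem.List.enumerate_append (xs := seq.take (t+1)) (ys := seq.drop (t+1)) (s := (0:Int))
  rw [List.take_append_drop] at hsplit2
  have hlen2 : (seq.take (t+1)).length = t+1 := by simp [List.length_take]; omega
  have hhi : (PySem.List.enumerate seq 0).foldl (hiStep (t:Int)) ((seq.length : Int)) =
      (match FB (seq.drop (t+1)) ((t:Int)+1) with | none => ((seq.length : Int)) | some k => k) := by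
    rw [hsplit2, List.foldl_append]
    have h1 : ∀ (acc : Int) (x : Int × Int), x ∈ PySem.List.enumerate (seq.take (t+1)) 0 → hiStep (t:Int) acc x = acc := by
      intro acc x hx
      rcases (PySem.List.mem_enumerate_iff _ _ _).mp hx with ⟨k, hk, rfl⟩
      have hnlt : ¬ ((t:Int) < (0:Int) + (k:Int)) := by rw [hlen2] at hk; push_cast; omega
      simp only [hiStep]
      exact if_neg (fun h => hnlt h.2)
    rw [PySem.List.foldl_congr_mem _ _ (fun a _ => a) _ h1, foldl_keep]
    have h2 : (PySem.List.enumerate (seq.drop (t+1)) (0 + ((seq.take (t+1)).length : Int))).foldl (hiStep (t:Int)) ((seq.length : Int)) =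
        (PySem.List.enumerate (seq.drop (t+1)) (0 + ((seq.take (t+1)).length : Int))).foldl hiMin ((seq.length : Int)) := by
      apply PySem.List.foldl_congr_mem
      intro acc x hx
      rcases (PySem.List.mem_enumerate_iff _ _ _).mp hx with ⟨k, hk, rfl⟩
      have hkgt : (t:Int) < 0 + ((seq.take (t+1)).length : Int) + (k:Int) := by rw [hlen2]; push_cast; omega
      simp only [hiStep, hiMin, and_iff_left hkgt]
    rw [h2]
    have hstart : (0 : Int) + ((seq.take (t+1)).length : Int) = (t:Int) + 1 := by rw [hlen2]; push_cast; omega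
    rw [hstart, fold_hiMin]
    rcases h : FB (seq.drop (t+1)) ((t:Int)+1) with _ | k
    · rfl
    · have hb := FB_bound _ _ _ h
      have hdl : (seq.drop (t+1)).length = seq.length - (t+1) := by simp
      rw [hdl] at hb
      simp only []
      rw [min_eq_right (by push_cast at hb ⊢; omega : k ≤ (seq.length : Int))]
  simp only [hlo, hhi]

theorem runeq (seq : List Int) (t : Nat) (ht : t < seq.length) (fl fr : Nat)
    (hfl : t ≤ fl) (hfr : seq.length - t ≤ fr) :
    scanL seq fl ((t:Int) - 1) + scanR seq (seq.length : Int) fr ((t:Int) + 1) + 1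
      = pvRunB seq (t:Int) := by
  rw [pvRunB_eq seq t ht]
  rw [scanL_eq seq t fl (by omega) hfl]
  have hdrop : seq.drop ((t:Int)+1).toNat = seq.drop (t+1) := by norm_num
  rw [scanR_eq seq (seq.drop (t+1)) ((t:Int)+1) fr (by omega) (by push_cast; omega) hdrop
      (by simp [List.length_drop]; omega)]
  rcases h1 : LB (seq.take t) 0 with _ | k1 <;>
    rcases h2 : FB (seq.drop (t+1)) ((t:Int)+1) with _ | k2 <;>
      simp only [h1, h2] <;> omega

theorem upA_eq (picture : List (List Int)) (col : Int) (cseq : List Int)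
    (H : ∀ i, pvCell picture i col = PySem.List.pyGet? cseq i) :
    ∀ (fuel : Nat) (i : Int), pvUpA picture col fuel i = scanL cseq fuel i := by
  intro fuel
  induction fuel with
  | zero => intro i; rfl
  | succ f ih =>
    intro i
    simp only [pvUpA, scanL, H, ih]

theorem downA_eq (picture : List (List Int)) (col : Int) (n : Int) (cseq : List Int)
    (H : ∀ i, pvCell picture i col = PySem.List.pyGet? cseq i) :
    ∀ (fuel : Nat) (i : Int), pvDownA picture col n fuel i = scanR cseq n fuel i := by
  intro fuel
  induction fuel with
  | zero => intro i; rfl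
  | succ f ih =>
    intro i
    simp only [pvDownA, scanR, H, ih]

theorem leftA_eq (picture : List (List Int)) (row : Int) (rseq : List Int)
    (H : ∀ j, pvCell picture row j = PySem.List.pyGet? rseq j) :
    ∀ (fuel : Nat) (j : Int), pvLeftA picture row fuel j = scanL rseq fuel j := by
  intro fuel
  induction fuel with
  | zero => intro j; rfl
  | succ f ih =>
    intro j
    simp only [pvLeftA, scanL, H, ih]

theorem rightA_eq (picture : List (List Int)) (row : Int) (w : Int) (rseq : List Int)
    (H : ∀ j, pvCell picture row j = PySem.List.pyGet? rseq j) :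
    ∀ (fuel : Nat) (j : Int), pvRightA picture row w fuel j = scanR rseq w fuel j := by
  intro fuel
  induction fuel with
  | zero => intro j; rfl
  | succ f ih =>
    intro j
    simp only [pvRightA, scanR, H, ih]

theorem cell_column (picture : List (List Int)) (col : Int) (W0 : Nat)
    (hrect : ∀ r ∈ picture, r.length = W0) (h0 : 0 ≤ col) (hw : col < (W0:Int)) :
    ∀ i, pvCell picture i col = PySem.List.pyGet? (pvColumn picture col) i := by
  intro i
  unfold pvCell pvColumn
  rw [pyGet?_map_cell]
  cases h : PySem.List.pyGet? picture i with
  | none => rfl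
  | some r =>
    have hmem : r ∈ picture := PySem.List.mem_of_pyGet?_eq_some _ h
    have hlen : r.length = W0 := hrect r hmem
    have hcr : PySem.List.pyGet? r col = some r[col.toNat] := by
      conv_lhs => rw [show col = ((col.toNat : Nat) : Int) by omega]
      rw [PySem.List.pyGet?_natCast, List.getElem?_eq_getElem (by omega : col.toNat < r.length)]
    simp only [Option.map_some, hcr, Option.getD_some]

-- ===== VERDICT (by name: the statement is the Claim_ definition above) =====
theorem min_seen_cells_spec : Claim_equal_min_seen_cells := by
  intro picture row col _ hpre
  unfold Spec_min_seen_cells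
  by_cases hc : pvCell picture row col = some 1
  · obtain ⟨hnn, himp⟩ := hpre
    obtain ⟨hr0, hc0, hrect⟩ := himp hc
    rcases h1 : PySem.List.pyGet? picture row with _ | rseq
    · exact absurd (by unfold pvCell; rw [h1]) hnn
    have hcr : PySem.List.pyGet? rseq col = some 1 := by
      simp only [pvCell, h1] at hc; exact hc
    have hrmem : rseq ∈ picture := PySem.List.mem_of_pyGet?_eq_some _ h1
    have hrow_lt : row < (picture.length : Int) := by
      by_contra hge
      have : PySem.List.pyGet? picture row = none := by
        rw [PySem.List.pyGet?_eq_none_iff]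
        intro hin; exact absurd hin.2 hge
      rw [this] at h1; cases h1
    have hcol_lt : col < (rseq.length : Int) := by
      by_contra hge
      have : PySem.List.pyGet? rseq col = none := by
        rw [PySem.List.pyGet?_eq_none_iff]
        intro hin; exact absurd hin.2 hge
      rw [this] at hcr; cases hcr
    have hrlen : rseq.length = (picture.headD []).length := hrect rseq hrmem
    have Hc : ∀ i, pvCell picture i col = PySem.List.pyGet? (pvColumn picture col) i :=
      cell_column picture col (picture.headD []).length hrect hc0 (by omega)
    have H2 : ∀ j, pvCell picture row j = PySem.List.pyGet? rseq j := by
      intro j; simp only [pvCell, h1]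
    have hclen : (pvColumn picture col).length = picture.length := by simp [pvColumn]
    -- picture[0] is the head
    have hw0 : ((PySem.List.pyGet? picture 0).getD []).length = (picture.headD []).length := by
      rcases picture with _ | ⟨p0, rest⟩
      · rfl
      · rw [PySem.List.pyGet?_zero_cons]; rfl
    rw [min_seen_cells, min_seen_cells_alt, if_neg (not_not_intro hc), if_neg (not_not_intro hc)]
    rw [upA_eq picture col (pvColumn picture col) Hc,
        downA_eq picture col _ (pvColumn picture col) Hc,
        leftA_eq picture row rseq H2,
        rightA_eq picture row _ rseq H2,
        h1]
    simp only [Option.getD_some]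
    rw [hw0, show ((picture.headD []).length : Int) = (rseq.length : Int) by rw [hrlen],
        show ((picture.length : Nat) : Int) = ((pvColumn picture col).length : Int) by rw [hclen]]
    have hrowc : row = ((row.toNat : Nat) : Int) := by omega
    have hcolc : col = ((col.toNat : Nat) : Int) := by omega
    rw [hrowc, hcolc]
    have hclen' : (pvColumn picture ((col.toNat : Nat) : Int)).length = picture.length := by simp [pvColumn]
    rw [← runeq rseq col.toNat (by omega) (rseq.length + 1) ((picture.headD []).length + rseq.length + 2) (by omega) (by omega)]
    rw [← runeq (pvColumn picture ((col.toNat : Nat) : Int)) row.toNat (by rw [hclen']; omega) (picture.length + 1) (2 * picture.length + 2) (by omega) (by rw [hclen']; omega)]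
    omega
  · rw [min_seen_cells, min_seen_cells_alt, if_pos hc, if_pos hc]
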